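-- pv_equiv track=rewrite | github.com/iRusek/Maze_Runner | navigate_maze_w_netcat.py | next_dir_free_roam
-- ===== SOURCE A (Python) =====
-- def opp(direc):
-- 	"""
-- 	input: direction (str)
-- 	output: opposite direction (str)
-- 	"""
-- 	if direc=="u":
-- 		return "d"
-- 	elif direc=="r":
-- 		return "l"
-- 	elif direc=="d":
-- 		return "u"
-- 	elif direc=="l":
-- 		return "r"
--
-- def next_dir_free_roam(dir_dic,direc,turnbacks):
-- 	# dir_dic is paths from location, direc is last direction
-- 	# roads untravelled (=0), travelled and not dead_end (=1, preferably not to last location), 	prefer nearest cw to opposite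
-- 	for pref in range(2):
-- 		next=counter_cw(direc)
-- 		while (next!=opp(direc)):
-- 			if dir_dic[next]==pref:
-- 				return next,0
-- 			else:
-- 				next=cw(next)
-- 	return opp(direc),turnbacks+1
--
-- def cw(direc):
-- 	return {"u":"r","r":"d","d":"l","l":"u"}[direc]
--
-- def counter_cw(direc):
-- 	return {"u":"l","r":"u","d":"r","l":"d"}[direc]
-- ===== SOURCE B (Python) =====
-- def opp(direc):
-- 	"""
-- 	input: direction (str)
-- 	output: opposite direction (str)
-- 	"""
-- 	if direc=="u":
-- 		return "d"
-- 	elif direc=="r":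
-- 		return "l"
-- 	elif direc=="d":
-- 		return "u"
-- 	elif direc=="l":
-- 		return "r"
--
-- def cw(direc):
-- 	return {"u":"r","r":"d","d":"l","l":"u"}[direc]
--
-- def counter_cw(direc):
-- 	return {"u":"l","r":"u","d":"r","l":"d"}[direc]
--
-- def next_dir_free_roam(dir_dic, direc, turnbacks):
-- 	# candidates clockwise from the counter-clockwise neighbour, excluding opp(direc)
-- 	back = opp(direc)
-- 	candidates = [counter_cw(direc), direc, cw(direc)]
-- 	fallback = None
-- 	for d in candidates:
-- 		v = dir_dic[d]
-- 		if v == 0: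
-- 			return d, 0
-- 		if v == 1 and fallback is None:
-- 			fallback = d
-- 	if fallback is not None:
-- 		return fallback, 0
-- 	return back, turnbacks + 1
-- ===== Notes on version B (the rewrite author's own statement) =====
-- stated objective: simpler
-- what changed: Replaces A's two preference passes (a for-pref loop re-running the clockwise while-scan, first looking for value 0 then for value 1) by building the three-candidate list [counter_cw(direc), direc, cw(direc)] once and making a single pass that returns immediately on value 0 while recording the first value-1 direction as a fallback.
import Mathlib
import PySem

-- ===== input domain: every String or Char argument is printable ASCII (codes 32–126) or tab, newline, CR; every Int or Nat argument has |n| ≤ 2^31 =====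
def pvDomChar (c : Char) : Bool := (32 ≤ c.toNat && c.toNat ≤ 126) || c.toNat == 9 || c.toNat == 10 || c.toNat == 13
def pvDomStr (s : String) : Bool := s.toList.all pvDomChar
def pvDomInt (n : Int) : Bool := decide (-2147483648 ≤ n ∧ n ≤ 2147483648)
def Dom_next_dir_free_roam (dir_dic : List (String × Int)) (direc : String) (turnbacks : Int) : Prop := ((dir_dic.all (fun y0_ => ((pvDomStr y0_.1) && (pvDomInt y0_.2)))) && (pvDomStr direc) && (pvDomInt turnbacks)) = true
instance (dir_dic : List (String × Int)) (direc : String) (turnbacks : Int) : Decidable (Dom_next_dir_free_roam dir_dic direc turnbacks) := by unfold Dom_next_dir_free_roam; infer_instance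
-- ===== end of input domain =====

-- B replaces A's two preference passes by one pass over the explicit candidate list
-- [counter_cw(direc), direc, cw(direc)] with a fallback variable (objective: simpler).

-- ===== PORT A =====
-- opp: Python returns None for a non-direction, so Option String
def oppA (direc : String) : Option String :=
  if direc = "u" then some "d"
  else if direc = "r" then some "l"
  else if direc = "d" then some "u"
  else if direc = "l" then some "r"
  else none

-- cw / counter_cw: dict literal lookup; none = KeyError
def cwA (direc : String) : Option String :=
  PySem.Dict.get? ⟨[("u","r"),("r","d"),("d","l"),("l","u")]⟩ direc

def counter_cwA (direc : String) : Option String :=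
  PySem.Dict.get? ⟨[("u","l"),("r","u"),("d","r"),("l","d")]⟩ direc

-- the inner while loop of A, with fuel (the cw-cycle has length 4, so fuel 5 is never
-- exhausted when direc is a direction; fuel is only a totality guard).
-- none = KeyError raised; some none = loop finished; some (some r) = returned r
def whileA (dir_dic : List (String × Int)) (stop : String) (pref : Int) :
    String → Nat → Option (Option (String × Int))
  | _, 0 => some none
  | next, fuel+1 =>
    if next = stop then some none
    else
      match PySem.Dict.get? ⟨dir_dic⟩ next with
      | none => none
      | some v =>
        if v = pref then some (some (next, 0))
        else
          match cwA next with
          | none => none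
          | some n' => whileA dir_dic stop pref n' fuel

def next_dir_free_roam (dir_dic : List (String × Int)) (direc : String) (turnbacks : Int) : String × Int :=
  match counter_cwA direc, oppA direc with
  | some start, some stop =>
    match whileA dir_dic stop 0 start 5 with        -- pref = 0
    | some (some r) => r
    | some none =>
      match whileA dir_dic stop 1 start 5 with      -- pref = 1
      | some (some r) => r
      | some none => (stop, turnbacks + 1)
      | none => ("", 0)                             -- KeyError (outside Pre_)
    | none => ("", 0)                               -- KeyError (outside Pre_)
  | _, _ => ("", 0)                                 -- KeyError (outside Pre_)

-- ===== PORT B =====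
-- B-side copies of the module helpers opp/cw/counter_cw
def oppB (direc : String) : Option String :=
  if direc = "u" then some "d"
  else if direc = "r" then some "l"
  else if direc = "d" then some "u"
  else if direc = "l" then some "r"
  else none

def cwB (direc : String) : Option String :=
  PySem.Dict.get? ⟨[("u","r"),("r","d"),("d","l"),("l","u")]⟩ direc

def counter_cwB (direc : String) : Option String :=
  PySem.Dict.get? ⟨[("u","l"),("r","u"),("d","r"),("l","d")]⟩ direc

-- single pass over the candidate list, recording the first value-1 direction as fallback.
-- none = KeyError; some (inl r) = returned r; some (inr fb) = loop done with fallback fb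
def scanB (dir_dic : List (String × Int)) :
    List String → Option String → Option ((String × Int) ⊕ Option String)
  | [], fb => some (.inr fb)
  | d :: rest, fb =>
    match PySem.Dict.get? ⟨dir_dic⟩ d with
    | none => none
    | some v =>
      if v = 0 then some (.inl (d, 0))
      else scanB dir_dic rest (if v = 1 ∧ fb = none then some d else fb)

def next_dir_free_roam_alt (dir_dic : List (String × Int)) (direc : String) (turnbacks : Int) : String × Int :=
  match oppB direc with
  | none => ("", 0)                                 -- not a direction (outside Pre_)
  | some back =>
    match counter_cwB direc with
    | none => ("", 0)                               -- KeyError (outside Pre_)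
    | some c0 =>
      match cwB direc with
      | none => ("", 0)                             -- KeyError (outside Pre_)
      | some c2 =>
        match scanB dir_dic [c0, direc, c2] none with
        | none => ("", 0)                           -- KeyError (outside Pre_)
        | some res =>
          match res with
          | .inl r => r
          | .inr fb =>
            match fb with
            | some f => (f, 0)
            | none => (back, turnbacks + 1)

-- ===== PRECONDITION & SPEC =====
-- total helpers for Pre_ only (counter_cw / cw on the four directions)
def ccwP (direc : String) : String :=
  if direc = "u" then "l" else if direc = "r" then "u" else if direc = "d" then "r" else "d"
def cwP (direc : String) : String :=
  if direc = "u" then "r" else if direc = "r" then "d" else if direc = "d" then "l" else "u"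

-- Pre_ = exactly the inputs on which A returns without a KeyError: direc is a direction and the
-- clockwise scan reaches only keys present in dir_dic (a missing key is only reached if every
-- earlier candidate is present with a nonzero value).
def Pre_next_dir_free_roam (dir_dic : List (String × Int)) (direc : String) (turnbacks : Int) : Prop :=
  (direc = "u" ∨ direc = "r" ∨ direc = "d" ∨ direc = "l") ∧
  (PySem.Dict.get? ⟨dir_dic⟩ (ccwP direc)).isSome = true ∧
  (PySem.Dict.get? ⟨dir_dic⟩ (ccwP direc) = some 0 ∨
    ((PySem.Dict.get? ⟨dir_dic⟩ direc).isSome = true ∧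
      (PySem.Dict.get? ⟨dir_dic⟩ direc = some 0 ∨
        (PySem.Dict.get? ⟨dir_dic⟩ (cwP direc)).isSome = true)))
instance (dir_dic : List (String × Int)) (direc : String) (turnbacks : Int) : Decidable (Pre_next_dir_free_roam dir_dic direc turnbacks) := by unfold Pre_next_dir_free_roam; infer_instance

def pvWitness_next_dir_free_roam : (List (String × Int)) × String × Int :=
  ([("l", 1), ("u", 2), ("r", 1), ("d", 0)], "u", 3)

def Spec_next_dir_free_roam (dir_dic : List (String × Int)) (direc : String) (turnbacks : Int) (out : String × Int) : Prop := out = next_dir_free_roam_alt dir_dic direc turnbacks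
instance (dir_dic : List (String × Int)) (direc : String) (turnbacks : Int) (out : String × Int) : Decidable (Spec_next_dir_free_roam dir_dic direc turnbacks out) := by unfold Spec_next_dir_free_roam; infer_instance

-- ===== CLAIM (what is proved, stated in full; the proofs are below) =====
def Claim_equal_next_dir_free_roam : Prop := ∀ (dir_dic : List (String × Int)) (direc : String) (turnbacks : Int), Dom_next_dir_free_roam dir_dic direc turnbacks → Pre_next_dir_free_roam dir_dic direc turnbacks → Spec_next_dir_free_roam dir_dic direc turnbacks (next_dir_free_roam dir_dic direc turnbacks)

-- ===== LEMMAS AND PROOFS =====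

-- main per-direction lemma: once direc is one of the four literals, everything reduces to
-- case analysis on the three dictionary lookups.
theorem key_lemma (dir_dic : List (String × Int)) (turnbacks : Int) (direc : String)
    (h : direc = "u" ∨ direc = "r" ∨ direc = "d" ∨ direc = "l")
    (hp : Pre_next_dir_free_roam dir_dic direc turnbacks) :
    next_dir_free_roam dir_dic direc turnbacks = next_dir_free_roam_alt dir_dic direc turnbacks := by
  obtain ⟨-, h0, hch⟩ := hp
  rcases h with h | h | h | h <;> subst h <;>
  · simp only [ccwP, cwP, String.reduceEq, reduceIte] at h0 hch
    obtain ⟨v0, hv0⟩ := Option.isSome_iff_exists.mp h0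
    rw [hv0] at hch
    by_cases e0 : v0 = 0
    · subst e0
      simp [next_dir_free_roam, next_dir_free_roam_alt, whileA, scanB,
        oppA, cwA, counter_cwA, oppB, cwB, counter_cwB, PySem.Dict.get?_mk_cons, hv0]
    · have hch1 : (PySem.Dict.get? ⟨dir_dic⟩ _).isSome = true ∧ _ :=
        hch.resolve_left (by simp [e0])
      obtain ⟨h1, hch2⟩ := hch1
      obtain ⟨v1, hv1⟩ := Option.isSome_iff_exists.mp h1
      rw [hv1] at hch2
      by_cases e1 : v1 = 0
      · subst e1
        simp [next_dir_free_roam, next_dir_free_roam_alt, whileA, scanB,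
          oppA, cwA, counter_cwA, oppB, cwB, counter_cwB, PySem.Dict.get?_mk_cons, hv0, hv1, e0]
      · have h2 := hch2.resolve_left (by simp [e1])
        obtain ⟨v2, hv2⟩ := Option.isSome_iff_exists.mp h2
        by_cases f0 : v0 = 1 <;> by_cases f1 : v1 = 1 <;> by_cases e2 : v2 = 0 <;>
          by_cases f2 : v2 = 1 <;>
          simp_all [next_dir_free_roam, next_dir_free_roam_alt, whileA, scanB,
            oppA, cwA, counter_cwA, oppB, cwB, counter_cwB, PySem.Dict.get?_mk_cons, hv0, hv1, hv2, e0, e1]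

-- ===== VERDICT (by name: the statement is the Claim_ definition above) =====
theorem next_dir_free_roam_spec : Claim_equal_next_dir_free_roam := by
  intro dir_dic direc turnbacks _ hp
  exact key_lemma dir_dic turnbacks direc hp.1 hp
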